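-- pv_equiv track=rewrite | github.com/farrar142/Bloom | bloom/web/messaging/stomp.py | _unescape_header_value
-- ===== SOURCE A (Python) =====
-- def _unescape_header_value(value: str) -> str:
--     """헤더 값 언이스케이프"""
--     result = []
--     i = 0
--     while i < len(value):
--         if value[i] == "\\" and i + 1 < len(value):
--             next_char = value[i + 1]
--             if next_char == "r":
--                 result.append("\r")
--             elif next_char == "n":
--                 result.append("\n")
--             elif next_char == "c":
--                 result.append(":")
--             elif next_char == "\\":
--                 result.append("\\")
--             else:
--                 result.append(value[i])
--                 result.append(next_char)
--             i += 2
--         else: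
--             result.append(value[i])
--             i += 1
--     return "".join(result)
-- ===== SOURCE B (Python) =====
-- import re
--
-- _STOMP_UNESCAPES = {"r": "\r", "n": "\n", "c": ":", "\\": "\\"}
--
--
-- def _unescape_header_value(value: str) -> str:
--     """Single regex pass: replace each backslash escape via a lookup table."""
--     return re.sub(r"\\(.)", lambda m: _STOMP_UNESCAPES.get(m.group(1), m.group(0)), value)
-- ===== Notes on version B (the rewrite author's own statement) =====
-- stated objective: idiomatic
-- what changed: A's manual index-driven while loop with a chain of elif branches and a result list is replaced by a single re.sub over the pattern \\(.) whose replacement function looks the captured character up in a table, returning the whole match for unknown escapes.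
import Mathlib
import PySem

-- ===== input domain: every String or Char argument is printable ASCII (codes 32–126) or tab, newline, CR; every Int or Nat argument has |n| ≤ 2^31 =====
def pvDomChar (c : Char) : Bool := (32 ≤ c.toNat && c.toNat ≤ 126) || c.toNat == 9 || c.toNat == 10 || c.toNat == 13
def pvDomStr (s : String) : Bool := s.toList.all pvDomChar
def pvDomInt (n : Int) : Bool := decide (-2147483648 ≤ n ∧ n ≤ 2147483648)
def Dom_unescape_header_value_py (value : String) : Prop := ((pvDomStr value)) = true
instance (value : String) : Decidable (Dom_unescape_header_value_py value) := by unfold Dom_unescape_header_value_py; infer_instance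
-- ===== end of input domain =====

-- B replaces A's index-driven while loop by a single regex substitution (re.sub with a lookup table); same return value, more idiomatic.

-- ===== PORT A =====
-- the while loop: index i, accumulator `result` (a list of one/two-char strings, as char lists), "".join at the end
def unescapeLoopA (cs : List Char) (i : Nat) (result : List (List Char)) : List (List Char) :=
  if h : i < cs.length then
    if cs[i] = '\\' ∧ i + 1 < cs.length then
      let next := cs.getD (i + 1) ' '      -- value[i + 1], in range by the guard
      let app : List (List Char) :=
        if next = 'r' then [['\r']]
        else if next = 'n' then [['\n']]
        else if next = 'c' then [[':']]
        else if next = '\\' then [['\\']]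
        else [[cs[i]], [next]]             -- result.append(value[i]); result.append(next_char)
      unescapeLoopA cs (i + 2) (result ++ app)
    else
      unescapeLoopA cs (i + 1) (result ++ [[cs[i]]])
  else result
termination_by cs.length - i

def unescape_header_value_py (value : String) : String :=
  String.ofList (PySem.Chars.join [] (unescapeLoopA value.toList 0 []))   -- "".join(result)

-- ===== PORT B =====
-- Source B: re.sub(r"\\(.)", lambda m: _STOMP_UNESCAPES.get(m.group(1), m.group(0)), value)
def stompUnescapes : PySem.Dict Char (List Char) :=
  PySem.Dict.mk [('r', ['\r']), ('n', ['\n']), ('c', [':']), ('\\', ['\\'])]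

-- Hand port of re.sub for the fixed pattern r"\\(.)" (PySem has no regex); exact:
-- a match is a backslash followed by any char except '\n' ('.' without DOTALL),
-- scanning left to right, non-overlapping, advancing one char where no match starts.
def reSubEscape : List Char → List Char
  | [] => []
  | [c] => [c]
  | a :: b :: rest =>
    if a = '\\' ∧ b ≠ '\n' then
      -- repl(m) = _STOMP_UNESCAPES.get(m.group(1), m.group(0)); m.group(0) = ['\\', b]
      PySem.Dict.getD stompUnescapes b ['\\', b] ++ reSubEscape rest
    else a :: reSubEscape (b :: rest)

def unescape_header_value_py_alt (value : String) : String :=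
  String.ofList (reSubEscape value.toList)

-- ===== PRECONDITION & SPEC =====
def Spec_unescape_header_value_py (value : String) (out : String) : Prop := out = unescape_header_value_py_alt value
instance (value : String) (out : String) : Decidable (Spec_unescape_header_value_py value out) := by unfold Spec_unescape_header_value_py; infer_instance

-- ===== CLAIM (what is proved, stated in full; the proofs are below) =====
def Claim_equal_unescape_header_value_py : Prop := ∀ (value : String), Dom_unescape_header_value_py value → Spec_unescape_header_value_py value (unescape_header_value_py value)

-- ===== LEMMAS AND PROOFS =====

lemma join_nil_eq_flatten (xs : List (List Char)) : PySem.Chars.join [] xs = xs.flatten := by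
  induction xs with
  | nil => rfl
  | cons a t ih => cases t <;> simp_all [PySem.Chars.join, List.intercalate]

lemma reSubEscape_cons_of_ne (d : Char) (rest : List Char) (hd : d ≠ '\\') :
    reSubEscape (d :: rest) = d :: reSubEscape rest := by
  cases rest with
  | nil => simp [reSubEscape]
  | cons b r => simp [reSubEscape, hd]

lemma unescapeLoopA_drop (n : Nat) : ∀ (cs : List Char) (i : Nat) (acc : List (List Char)),
    cs.length ≤ i + n →
    (unescapeLoopA cs i acc).flatten = acc.flatten ++ reSubEscape (cs.drop i) := by
  induction n with
  | zero =>
    intro cs i acc hn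
    rw [unescapeLoopA, dif_neg (by omega), List.drop_eq_nil_of_le (by omega)]
    simp [reSubEscape]
  | succ n ih =>
    intro cs i acc hn
    rw [unescapeLoopA]
    by_cases h : i < cs.length
    · rw [dif_pos h]
      by_cases hm : cs[i] = '\\' ∧ i + 1 < cs.length
      · rw [if_pos hm]
        have hg : cs.getD (i + 1) ' ' = cs[i + 1] := List.getD_eq_getElem cs ' ' hm.2
        have hdrop : cs.drop i = cs[i] :: cs[i + 1] :: cs.drop (i + 2) := by
          rw [List.drop_eq_getElem_cons h, List.drop_eq_getElem_cons hm.2]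
        rw [hg, ih cs (i + 2) _ (by omega), hdrop, hm.1]
        by_cases hn' : cs[i + 1] = '\n'
        · -- '\' + newline: '.' does not match '\n', so no regex match starts here
          rw [show reSubEscape ('\\' :: cs[i + 1] :: cs.drop (i + 2))
                = '\\' :: reSubEscape (cs[i + 1] :: cs.drop (i + 2)) by
            simp [reSubEscape, hn']]
          rw [reSubEscape_cons_of_ne _ _ (by rw [hn']; decide)]
          simp [hn']
        · rw [show reSubEscape ('\\' :: cs[i + 1] :: cs.drop (i + 2))
                = PySem.Dict.getD stompUnescapes cs[i + 1] ['\\', cs[i + 1]]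
                    ++ reSubEscape (cs.drop (i + 2)) by
            simp [reSubEscape, hn']]
          by_cases h1 : cs[i + 1] = 'r'
          · simp [h1, stompUnescapes, PySem.Dict.getD, PySem.Dict.get?]
          by_cases h2 : cs[i + 1] = 'n'
          · simp [h2, stompUnescapes, PySem.Dict.getD, PySem.Dict.get?]
          by_cases h3 : cs[i + 1] = 'c'
          · simp [h3, stompUnescapes, PySem.Dict.getD, PySem.Dict.get?]
          by_cases h4 : cs[i + 1] = '\\'
          · simp [h4, stompUnescapes, PySem.Dict.getD, PySem.Dict.get?]
          · have e1 : ('r' == cs[i + 1]) = false := beq_eq_false_iff_ne.mpr (Ne.symm h1)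
            have e2 : ('n' == cs[i + 1]) = false := beq_eq_false_iff_ne.mpr (Ne.symm h2)
            have e3 : ('c' == cs[i + 1]) = false := beq_eq_false_iff_ne.mpr (Ne.symm h3)
            have e4 : ('\\' == cs[i + 1]) = false := beq_eq_false_iff_ne.mpr (Ne.symm h4)
            simp [h1, h2, h3, h4, List.find?, e1, e2, e3, e4,
              stompUnescapes, PySem.Dict.getD, PySem.Dict.get?]
      · rw [if_neg hm]
        rw [ih cs (i + 1) _ (by omega)]
        by_cases h1 : i + 1 < cs.length
        · have hc : ¬ cs[i] = '\\' := by tauto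
          rw [List.drop_eq_getElem_cons h, reSubEscape_cons_of_ne _ _ hc]
          simp
        · have hlast : cs.drop i = [cs[i]] := by
            rw [List.drop_eq_getElem_cons h, List.drop_eq_nil_of_le (by omega)]
          rw [hlast, List.drop_eq_nil_of_le (show cs.length ≤ i + 1 by omega)]
          simp [reSubEscape]
    · rw [dif_neg h, List.drop_eq_nil_of_le (by omega)]
      simp [reSubEscape]

-- ===== VERDICT (by name: the statement is the Claim_ definition above) =====
theorem unescape_header_value_py_spec : Claim_equal_unescape_header_value_py := by
  intro value _
  show _ = _
  unfold unescape_header_value_py unescape_header_value_py_alt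
  rw [join_nil_eq_flatten, unescapeLoopA_drop value.toList.length value.toList 0 [] (by omega)]
  simp
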